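-- pv_equiv track=rewrite | github.com/ursakumeljfaks/Prakticna-matematika | 3.letnik/Racunalnistvo 1/Vaje1/datumi-5.py | dolzine_mesecev
-- ===== SOURCE A (Python) =====
-- def je_prestopno(leto):
--     return (leto % 4 == 0 and leto % 100 != 0) or leto % 400 == 0
--
-- def dolzine_mesecev(leto):
--     dnevi = [0] * 12
--     for i in range(7):
--         if i % 2 == 0:
--             dnevi[i] = 31
--         else:
--             dnevi[i] = 30
--         if je_prestopno(leto):
--             dnevi[1] = 29
--         else:
--             dnevi[1] = 28
--
--     for i in range(7, 12):
--         if i % 2 == 0: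
--             dnevi[i] = 30
--         else:
--             dnevi[i] = 31
--
--     return dnevi
-- ===== SOURCE B (Python) =====
-- def dolzine_mesecev(leto):
--     prestopno = (leto % 4 == 0 and leto % 100 != 0) or leto % 400 == 0
--     return [31, 29 if prestopno else 28, 31, 30, 31, 30, 31, 31, 30, 31, 30, 31]
-- ===== Notes on version B (the rewrite author's own statement) =====
-- stated objective: simpler
-- what changed: Replaces A's two index-parity loops over a zero-initialised array (with the February assignment redone on every iteration of the first loop) by a direct fixed list literal with a conditional expression for February.
import Mathlib
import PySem

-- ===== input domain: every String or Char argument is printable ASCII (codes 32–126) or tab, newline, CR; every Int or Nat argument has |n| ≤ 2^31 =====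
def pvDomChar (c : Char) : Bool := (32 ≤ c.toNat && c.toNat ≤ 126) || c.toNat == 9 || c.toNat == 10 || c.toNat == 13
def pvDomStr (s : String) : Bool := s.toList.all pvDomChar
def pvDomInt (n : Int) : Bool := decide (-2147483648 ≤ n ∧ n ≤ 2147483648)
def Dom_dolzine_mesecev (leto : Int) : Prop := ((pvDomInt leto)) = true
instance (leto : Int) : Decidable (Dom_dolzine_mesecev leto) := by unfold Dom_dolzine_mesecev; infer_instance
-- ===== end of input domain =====

-- B replaces A's index-parity loops by a direct fixed list literal with a conditional February (simpler).


-- ===== PORT A =====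
def je_prestopno (leto : Int) : Bool :=
  (PySem.Int.mod leto 4 == 0 && PySem.Int.mod leto 100 != 0) || PySem.Int.mod leto 400 == 0

def dolzine_mesecev (leto : Int) : List Int :=
  let dnevi : List Int := List.replicate 12 0
  let dnevi := (PySem.List.pyRange 0 7 1).foldl (fun d i =>
    let d := if i % 2 == 0 then d.set i.toNat 31 else d.set i.toNat 30
    if je_prestopno leto then d.set 1 29 else d.set 1 28) dnevi
  let dnevi := (PySem.List.pyRange 7 12 1).foldl (fun d i =>
    if i % 2 == 0 then d.set i.toNat 30 else d.set i.toNat 31) dnevi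
  dnevi

-- ===== PORT B =====
def dolzine_mesecev_alt (leto : Int) : List Int :=
  let prestopno := (PySem.Int.mod leto 4 == 0 && PySem.Int.mod leto 100 != 0) || PySem.Int.mod leto 400 == 0
  [31, if prestopno then 29 else 28, 31, 30, 31, 30, 31, 31, 30, 31, 30, 31]

-- ===== PRECONDITION & SPEC =====
def Spec_dolzine_mesecev (leto : Int) (out : List Int) : Prop := out = dolzine_mesecev_alt leto
instance (leto : Int) (out : List Int) : Decidable (Spec_dolzine_mesecev leto out) := by unfold Spec_dolzine_mesecev; infer_instance

-- ===== CLAIM (what is proved, stated in full; the proofs are below) =====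
def Claim_equal_dolzine_mesecev : Prop := ∀ (leto : Int), Dom_dolzine_mesecev leto → Spec_dolzine_mesecev leto (dolzine_mesecev leto)

-- ===== LEMMAS AND PROOFS =====

-- ===== VERDICT (by name: the statement is the Claim_ definition above) =====
theorem dolzine_mesecev_spec : Claim_equal_dolzine_mesecev := by
  intro leto _
  unfold Spec_dolzine_mesecev dolzine_mesecev dolzine_mesecev_alt je_prestopno
  generalize ((PySem.Int.mod leto 4 == 0 && PySem.Int.mod leto 100 != 0) || PySem.Int.mod leto 400 == 0) = p
  cases p <;> decide
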